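-- pv_equiv track=rewrite | github.com/lindaxie7/Intro-to-programming-concepts | CSCI 1133/practice1- 1135.py | countGt
-- ===== SOURCE A (Python) =====
-- def countGt(mylist):
--     list1 = []
--     for x in mylist:
--         count = 0
--         for y in mylist:
--             if y > x:
--              count = count + 1
--         list1.append(count)
--     return list1
-- ===== SOURCE B (Python) =====
-- def countGt(mylist):
--     s = sorted(mylist)
--     n = len(s)
--     out = []
--     for x in mylist:
--         # binary search: first index with s[i] > x (hand-written bisect_right)
--         lo, hi = 0, n
--         while lo < hi:
--             mid = (lo + hi) // 2
--             if s[mid] <= x: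
--                 lo = mid + 1
--             else:
--                 hi = mid
--         out.append(n - lo)
--     return out
-- ===== Notes on version B (the rewrite author's own statement) =====
-- stated objective: faster
-- what changed: Replaced the nested O(n^2) double scan with sort-once plus a hand-written bisect_right binary search per element (answer = n - bisect_right(sorted, x)).
import Mathlib
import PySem

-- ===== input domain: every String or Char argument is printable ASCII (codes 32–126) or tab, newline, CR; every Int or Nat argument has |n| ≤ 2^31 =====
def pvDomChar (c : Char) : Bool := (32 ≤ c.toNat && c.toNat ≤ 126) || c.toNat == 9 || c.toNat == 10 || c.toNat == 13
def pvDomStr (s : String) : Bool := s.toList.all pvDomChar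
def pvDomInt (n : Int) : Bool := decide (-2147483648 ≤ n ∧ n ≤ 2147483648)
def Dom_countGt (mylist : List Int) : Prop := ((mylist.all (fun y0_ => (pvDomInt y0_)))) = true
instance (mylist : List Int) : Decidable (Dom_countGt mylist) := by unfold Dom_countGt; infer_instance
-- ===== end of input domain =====

-- B sorts once and answers each query by a hand-written binary search (n - bisect_right),
-- replacing A's quadratic double scan; objective: faster (asymptotic).


-- ===== PORT A =====
def countGt (mylist : List Int) : List Int :=
  mylist.foldl (fun list1 x =>
    list1 ++ [mylist.foldl (fun count y => if y > x then count + 1 else count) (0 : Int)])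
    []

-- ===== PORT B =====
-- the while-loop of Source B's binary search; s.getD mid 0 is s[mid] (mid < hi ≤ len s always holds)
def bisectGo (s : List Int) (x : Int) (lo hi : Nat) : Nat :=
  if lo < hi then
    let mid := (lo + hi) / 2
    if s.getD mid 0 ≤ x then bisectGo s x (mid + 1) hi
    else bisectGo s x lo mid
  else lo
termination_by hi - lo
decreasing_by all_goals omega

def countGt_alt (mylist : List Int) : List Int :=
  let s := PySem.List.sorted mylist (fun x => x) false
  let n := s.length
  mylist.foldl (fun out x => out ++ [(n : Int) - (bisectGo s x 0 n : Int)]) []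

-- ===== PRECONDITION & SPEC =====
def Spec_countGt (mylist : List Int) (out : List Int) : Prop := out = countGt_alt mylist
instance (mylist : List Int) (out : List Int) : Decidable (Spec_countGt mylist out) := by unfold Spec_countGt; infer_instance

-- ===== CLAIM (what is proved, stated in full; the proofs are below) =====
def Claim_equal_countGt : Prop := ∀ (mylist : List Int), Dom_countGt mylist → Spec_countGt mylist (countGt mylist)

-- ===== LEMMAS AND PROOFS =====

-- a list whose predicate holds exactly on the first r positions has countP = r
theorem countP_of_split (s : List Int) (p : Int → Bool) (r : Nat) (hr : r ≤ s.length)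
    (h1 : ∀ i, i < r → p (s.getD i 0) = true)
    (h2 : ∀ i, r ≤ i → i < s.length → p (s.getD i 0) = false) :
    s.countP p = r := by
  induction s generalizing r with
  | nil =>
    simp only [List.length_nil, Nat.le_zero] at hr
    subst hr; simp
  | cons a t ih =>
    cases r with
    | zero =>
      have ha := h2 0 (Nat.le_refl 0) (by simp)
      simp only [List.getD_cons_zero] at ha
      have ht : t.countP p = 0 := by
        apply ih 0 (Nat.zero_le _) (by intro i hi; omega)
        intro i _ hi
        have := h2 (i + 1) (by omega) (by simpa using Nat.succ_lt_succ hi)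
        simpa using this
      simp [ha, ht]
    | succ r' =>
      have ha := h1 0 (Nat.succ_pos _)
      simp only [List.getD_cons_zero] at ha
      have ht : t.countP p = r' := by
        apply ih r' (by simp at hr; omega)
        · intro i hi
          have := h1 (i + 1) (by omega); simpa using this
        · intro i hi hlen
          have := h2 (i + 1) (by omega) (by simpa using Nat.succ_lt_succ hlen)
          simpa using this
      simp [ha, ht]

-- binary-search invariant: with everything before lo ≤ x and everything from hi on > x,
-- bisectGo lands on countP (· ≤ x)
theorem bisectGo_spec (s : List Int) (x : Int)
    (hmono : ∀ p q, p ≤ q → q < s.length → s.getD p 0 ≤ s.getD q 0)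
    (lo hi : Nat) (hlh : lo ≤ hi) (hhi : hi ≤ s.length)
    (h1 : ∀ i, i < lo → s.getD i 0 ≤ x)
    (h2 : ∀ i, hi ≤ i → i < s.length → x < s.getD i 0) :
    bisectGo s x lo hi = s.countP (fun y => y ≤ x) := by
  unfold bisectGo
  dsimp only
  split
  · next h =>
    have hmlt : (lo + hi) / 2 < hi := by omega
    have hmlo : lo ≤ (lo + hi) / 2 := by omega
    set mid := (lo + hi) / 2 with hmid
    split
    · next hle =>
      exact bisectGo_spec s x hmono (mid + 1) hi (by omega) hhi
        (fun i hi' => le_trans (hmono i mid (by omega) (by omega)) hle) h2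
    · next hgt =>
      exact bisectGo_spec s x hmono lo mid (by omega) (by omega) h1
        (fun i hi' hl => lt_of_lt_of_le (by omega : x < s.getD mid 0)
          (hmono mid i hi' hl))
  · next h =>
    have hlo : lo = hi := by omega
    subst hlo
    refine (countP_of_split s _ lo (by omega) ?_ ?_).symm
    · intro i hi'; simpa using h1 i hi'
    · intro i hge hlt; simpa using not_le.mpr (h2 i hge hlt)
termination_by hi - lo
decreasing_by all_goals omega

theorem countGt_eq_map (mylist : List Int) :
    countGt mylist = mylist.map (fun x => (mylist.countP (fun y => x < y) : Int)) := by
  unfold countGt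
  rw [PySem.List.foldl_append_singleton_eq_map]
  simp only [List.nil_append]
  apply List.map_congr_left
  intro x _
  simpa using PySem.List.foldl_if_add_one (fun y => x < y) mylist 0

theorem sorted_getD_mono (mylist : List Int) :
    ∀ p q, p ≤ q → q < (PySem.List.sorted mylist (fun x => x) false).length →
      (PySem.List.sorted mylist (fun x => x) false).getD p 0 ≤
      (PySem.List.sorted mylist (fun x => x) false).getD q 0 := by
  intro p q hpq hq
  rw [List.getD_eq_getElem _ _ (by omega), List.getD_eq_getElem _ _ hq]
  exact PySem.List.sorted_id_getElem_mono mylist hpq hq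

-- ===== VERDICT (by name: the statement is the Claim_ definition above) =====
theorem countGt_spec : Claim_equal_countGt := by
  intro mylist _
  unfold Spec_countGt countGt_alt
  rw [countGt_eq_map]
  set s := PySem.List.sorted mylist (fun x => x) false with hs
  rw [PySem.List.foldl_append_singleton_eq_map]
  simp only [List.nil_append]
  apply List.map_congr_left
  intro x _
  have hperm : s.Perm mylist := PySem.List.sorted_perm mylist (fun x => x) false
  have hlen : s.length = mylist.length := hperm.length_eq
  have hb := bisectGo_spec s x (sorted_getD_mono mylist) 0 s.length (Nat.zero_le _)
    (Nat.le_refl _) (by omega) (by omega)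
  rw [hb, hperm.countP_eq]
  have hsplit : mylist.countP (fun y => decide (y ≤ x)) + mylist.countP (fun y => decide (x < y))
      = mylist.length := by
    have h0 := List.length_eq_countP_add_countP (l := mylist) (p := fun y : Int => decide (y ≤ x))
    have h1 : mylist.countP (fun a => decide ¬(decide (a ≤ x) = true))
        = mylist.countP (fun y => decide (x < y)) := by
      apply List.countP_congr; intro a _; simp [not_le]
    omega
  omega
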